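-- pv_equiv track=rewrite | github.com/dinleo/CodeTest | PyCode/Programmers_Test/Company/Gauss/Gauss_2022/3.py | solution
-- ===== SOURCE A (Python) =====
-- from collections import defaultdict
--
-- def solution(value, projects):
--     v = dict()
--     for i in range(len(value)):
--         v[str(i+1)] = value[i]
--
--     g = defaultdict(list)
--     for p in projects:
--         g[str(p[0])].append(str(p[1]))
--
--     def combine_node(node):
--         if node not in g.keys():
--             return v[node]
--         arr = g[node]
--         maxima = 0
--         for i in arr:
--             val = combine_node(i)
--             if maxima < val:
--                 maxima = val
--         return v[node] + maxima
--
--     return combine_node('1')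
-- ===== SOURCE B (Python) =====
-- def solution(value, projects):
--     g = {}
--     for p in projects:
--         g.setdefault(p[0], []).append(p[1])
--     memo = {}
--
--     def dfs(node):
--         if node in memo:
--             return memo[node]
--         if node in g:
--             best = 0
--             for c in g[node]:
--                 best = max(best, dfs(c))
--             r = value[node - 1] + best
--         else:
--             r = value[node - 1]
--         memo[node] = r
--         return r
--
--     return dfs(1)
-- ===== Notes on version B (the rewrite author's own statement) =====
-- stated objective: faster
-- what changed: Replaces A's unmemoized recursive DFS over string-keyed dicts by a memoized DFS over integer labels that computes each node's best path at most once (DP over the DAG).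
import Mathlib
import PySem

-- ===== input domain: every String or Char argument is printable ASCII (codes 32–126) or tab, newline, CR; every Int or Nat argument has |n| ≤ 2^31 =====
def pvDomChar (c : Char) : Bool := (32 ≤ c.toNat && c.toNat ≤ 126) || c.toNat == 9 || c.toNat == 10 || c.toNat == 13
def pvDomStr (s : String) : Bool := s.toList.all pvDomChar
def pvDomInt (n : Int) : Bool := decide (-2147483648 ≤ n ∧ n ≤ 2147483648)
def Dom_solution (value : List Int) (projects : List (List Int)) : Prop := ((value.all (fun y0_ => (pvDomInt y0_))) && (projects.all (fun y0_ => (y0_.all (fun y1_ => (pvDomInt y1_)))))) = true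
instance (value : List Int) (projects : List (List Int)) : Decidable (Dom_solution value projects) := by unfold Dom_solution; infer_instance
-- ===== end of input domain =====

-- B replaces A's unmemoized recursive DFS over string-keyed dicts by a memoized DFS over
-- integer labels (each node's best path computed at most once); objective: faster (measured).

-- ===== PORT A =====
-- combine_node of A; the Nat argument is fuel making the unbounded Python recursion total
-- (under Pre_solution the fuel is never exhausted); v[node] is ported as (get? …).getD 0,
-- the default being unreachable under Pre_solution (Python raises KeyError there).
def solutionCombine (v : PySem.Dict String Int) (g : PySem.Dict String (List String)) : Nat → String → Int
  | 0, _ => 0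
  | fuel + 1, node =>
    if g.contains node = false then (v.get? node).getD 0
    else
      (v.get? node).getD 0 +
        (g.getD node []).foldl (fun maxima i =>
          let val := solutionCombine v g fuel i
          if maxima < val then val else maxima) 0

def solution (value : List Int) (projects : List (List Int)) : Int :=
  let v : PySem.Dict String Int :=
    (PySem.List.pyRange 0 (PySem.List.len value) 1).foldl
      (fun d i => d.insert (PySem.Int.toStr (i + 1)) ((PySem.List.pyGet? value i).getD 0))
      PySem.Dict.empty
  let g : PySem.Dict String (List String) :=
    projects.foldl
      (fun d p =>
        d.modify (PySem.Int.toStr ((PySem.List.pyGet? p 0).getD 0)) []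
          (fun l => l ++ [PySem.Int.toStr ((PySem.List.pyGet? p 1).getD 0)]))
      PySem.Dict.empty
  solutionCombine v g (value.length + 1) "1"

-- ===== PORT B =====
-- dfs of B with the memo dict threaded through; the Nat argument is fuel making the unbounded
-- Python recursion total (under Pre_solution the fuel is never exhausted); value[node-1] is
-- ported as (pyGet? …).getD 0, the default being unreachable under Pre_solution.
def solutionAltDfs (value : List Int) (g : PySem.Dict Int (List Int)) : Nat → PySem.Dict Int Int → Int → (PySem.Dict Int Int × Int)
  | 0, memo, _ => (memo, 0)
  | fuel + 1, memo, node =>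
    if memo.contains node then (memo, (memo.get? node).getD 0)
    else if g.contains node then
      let res := (g.getD node []).foldl
        (fun acc c =>
          let r2 := solutionAltDfs value g fuel acc.1 c
          (r2.1, max acc.2 r2.2)) (memo, 0)
      let r := (PySem.List.pyGet? value (node - 1)).getD 0 + res.2
      (res.1.insert node r, r)
    else
      let r := (PySem.List.pyGet? value (node - 1)).getD 0
      (memo.insert node r, r)

def solution_alt (value : List Int) (projects : List (List Int)) : Int :=
  let g : PySem.Dict Int (List Int) :=
    projects.foldl
      (fun d p =>
        d.modify ((PySem.List.pyGet? p 0).getD 0) []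
          (fun l => l ++ [(PySem.List.pyGet? p 1).getD 0]))
      PySem.Dict.empty
  (solutionAltDfs value g (value.length + 1) PySem.Dict.empty 1).2

-- ===== PRECONDITION & SPEC =====
-- The directed graph of the input, as a reader checks it: its edge list, one reachability step,
-- the set of successors of a node, and the set of nodes reachable from node 1.
def pvE (projects : List (List Int)) : List (Int × Int) :=
  projects.map (fun p => (p.getD 0 0, p.getD 1 0))
def pvStepF (E : List (Int × Int)) (S : Finset Int) : Finset Int :=
  S ∪ ((E.filter (fun e => decide (e.1 ∈ S))).map Prod.snd).toFinset
def pvChildrenF (E : List (Int × Int)) (j : Int) : Finset Int :=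
  ((E.filter (fun e => decide (e.1 = j))).map Prod.snd).toFinset
def pvReach (value : List Int) (projects : List (List Int)) : Finset Int :=
  (pvStepF (pvE projects))^[value.length] {1}

-- Pre_solution holds exactly where Python A returns normally: every project row has at least two
-- entries (else IndexError), every node reachable from node 1 is a valid label 1..len(value)
-- (else KeyError on v), and no node reachable from node 1 lies on a cycle (else the recursion
-- never terminates); B raises on the same rows/cycles and misindexes the same missing labels.
def Pre_solution (value : List Int) (projects : List (List Int)) : Prop :=
  (∀ p ∈ projects, 2 ≤ p.length) ∧
  (∀ j ∈ pvReach value projects, 1 ≤ j ∧ j ≤ (value.length : Int)) ∧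
  (∀ j ∈ pvReach value projects, j ∉ (pvStepF (pvE projects))^[value.length] (pvChildrenF (pvE projects) j))
instance (value : List Int) (projects : List (List Int)) : Decidable (Pre_solution value projects) := by
  unfold Pre_solution; infer_instance
def pvWitness_solution : List Int × List (List Int) := ([3, 5, 7], [[1, 3], [3, 2]])

def Spec_solution (value : List Int) (projects : List (List Int)) (out : Int) : Prop := out = solution_alt value projects
instance (value : List Int) (projects : List (List Int)) (out : Int) : Decidable (Spec_solution value projects out) := by unfold Spec_solution; infer_instance

-- ===== CLAIM (what is proved, stated in full; the proofs are below) =====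
def Claim_equal_solution : Prop := ∀ (value : List Int) (projects : List (List Int)), Dom_solution value projects → Pre_solution value projects → Spec_solution value projects (solution value projects)

-- ===== LEMMAS AND PROOFS =====

-- ---- injectivity of str(n) ----
lemma pv_digitChar_val {d : ℕ} (hd : d < 10) : (Nat.digitChar d).toNat - 48 = d := by
  interval_cases d <;> rfl

lemma pv_toDigitsCore_eq : ∀ (n : ℕ), 1 ≤ n → ∀ (f : ℕ) (acc : List Char), n < f →
    Nat.toDigitsCore 10 f n acc = ((Nat.digits 10 n).map Nat.digitChar).reverse ++ acc := by
  intro n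
  induction n using Nat.strong_induction_on with
  | _ n ih =>
    intro h1 f acc hf
    match f with
    | f + 1 =>
      rw [Nat.toDigitsCore]
      rw [Nat.digits_def' (by norm_num : 1 < 10) (by omega : 0 < n)]
      by_cases hq : n / 10 = 0
      · simp [hq, Nat.digits_zero]
      · simp only [hq, if_false]
        rw [ih (n / 10) (by omega) (by omega) f _ (by omega)]
        simp

lemma pv_toDigits_eq (n : ℕ) (h : 1 ≤ n) :
    Nat.toDigits 10 n = ((Nat.digits 10 n).map Nat.digitChar).reverse := by
  rw [Nat.toDigits, pv_toDigitsCore_eq n h (n + 1) [] (by omega), List.append_nil]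

def pvDec (cs : List Char) : ℕ := Nat.ofDigits 10 (cs.reverse.map (fun c => c.toNat - 48))

lemma pv_dec_toDigits (n : ℕ) : pvDec (Nat.toDigits 10 n) = n := by
  rcases Nat.eq_zero_or_pos n with h | h
  · subst h; rfl
  · rw [pv_toDigits_eq n h]
    unfold pvDec
    rw [List.reverse_reverse, List.map_map]
    have : ∀ d ∈ Nat.digits 10 n, ((fun c => c.toNat - 48) ∘ Nat.digitChar) d = id d := by
      intro d hd
      exact pv_digitChar_val (Nat.digits_lt_base (by norm_num) hd)
    rw [List.map_congr_left this, List.map_id, Nat.ofDigits_digits]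

lemma pv_toDigits_inj {a b : ℕ} (h : Nat.toDigits 10 a = Nat.toDigits 10 b) : a = b := by
  have := congrArg pvDec h
  rwa [pv_dec_toDigits, pv_dec_toDigits] at this

lemma pv_digitChar_ne {d : ℕ} (hd : d < 10) : Nat.digitChar d ≠ '-' := by
  interval_cases d <;> decide

lemma pv_toDigits_no_minus (n : ℕ) : ∀ c ∈ Nat.toDigits 10 n, c ≠ '-' := by
  rcases Nat.eq_zero_or_pos n with h | h
  · subst h
    intro c hc
    have : Nat.toDigits 10 0 = ['0'] := rfl
    rw [this, List.mem_singleton] at hc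
    subst hc; decide
  · rw [pv_toDigits_eq n h]
    intro c hc
    rw [List.mem_reverse, List.mem_map] at hc
    obtain ⟨d, hd, rfl⟩ := hc
    exact pv_digitChar_ne (Nat.digits_lt_base (by norm_num) hd)

lemma pv_toStr_inj : Function.Injective PySem.Int.toStr := by
  intro a b h
  have h2 : PySem.Int.toChars a = PySem.Int.toChars b := by
    have := congrArg String.toList h
    rwa [PySem.Int.toList_toStr, PySem.Int.toList_toStr] at this
  unfold PySem.Int.toChars at h2
  split_ifs at h2 with ha hb hb
  · rw [List.cons.injEq] at h2
    have := pv_toDigits_inj h2.2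
    omega
  · have hm : '-' ∈ Nat.toDigits 10 b.toNat := by rw [← h2]; exact List.mem_cons_self ..
    exact absurd rfl (pv_toDigits_no_minus b.toNat '-' hm)
  · have hm : '-' ∈ Nat.toDigits 10 a.toNat := by rw [h2]; exact List.mem_cons_self ..
    exact absurd rfl (pv_toDigits_no_minus a.toNat '-' hm)
  · have := pv_toDigits_inj h2
    omega

-- ---- shared abbreviations (definitionally the let-bodies of the two ports) ----
def pvKey (p : List Int) : Int := (PySem.List.pyGet? p 0).getD 0

def pvChild (p : List Int) : Int := (PySem.List.pyGet? p 1).getD 0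

def pvGB (projects : List (List Int)) : PySem.Dict Int (List Int) :=
  projects.foldl
    (fun d p =>
      d.modify ((PySem.List.pyGet? p 0).getD 0) []
        (fun l => l ++ [(PySem.List.pyGet? p 1).getD 0]))
    PySem.Dict.empty

lemma pv_gb_getD (projects : List (List Int)) (j : Int) :
    (pvGB projects).getD j [] =
      ((projects.map (fun p => (pvKey p, pvChild p))).filter (fun q => q.1 == j)).map (·.2) := by
  unfold pvGB
  rw [show (List.foldl (fun d p =>
        d.modify ((PySem.List.pyGet? p 0).getD 0) [] (fun l => l ++ [(PySem.List.pyGet? p 1).getD 0]))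
        PySem.Dict.empty projects)
      = List.foldl (fun (d : PySem.Dict Int (List Int)) (q : Int × Int) => d.modify q.1 [] (fun l => l ++ [q.2]))
        PySem.Dict.empty (projects.map (fun p => (pvKey p, pvChild p))) from
    (List.foldl_map (f := fun p => (pvKey p, pvChild p)) (g := fun (d : PySem.Dict Int (List Int)) (q : Int × Int) => d.modify q.1 [] (fun l => l ++ [q.2]))).symm]
  rw [PySem.Dict.getD_foldl_modify_append]
  simp [pvKey, pvChild]

def pvGA (projects : List (List Int)) : PySem.Dict String (List String) :=
  projects.foldl
    (fun d p =>
      d.modify (PySem.Int.toStr ((PySem.List.pyGet? p 0).getD 0)) []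
        (fun l => l ++ [PySem.Int.toStr ((PySem.List.pyGet? p 1).getD 0)]))
    PySem.Dict.empty

lemma pv_ga_getD (projects : List (List Int)) (j : Int) :
    (pvGA projects).getD (PySem.Int.toStr j) [] = ((pvGB projects).getD j []).map PySem.Int.toStr := by
  unfold pvGA
  rw [show (List.foldl (fun d p =>
        d.modify (PySem.Int.toStr ((PySem.List.pyGet? p 0).getD 0)) []
          (fun l => l ++ [PySem.Int.toStr ((PySem.List.pyGet? p 1).getD 0)]))
        PySem.Dict.empty projects)
      = List.foldl (fun (d : PySem.Dict String (List String)) (q : String × String) => d.modify q.1 [] (fun l => l ++ [q.2]))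
        PySem.Dict.empty (projects.map (fun p => (PySem.Int.toStr (pvKey p), PySem.Int.toStr (pvChild p)))) from
    (List.foldl_map (f := fun p => (PySem.Int.toStr (pvKey p), PySem.Int.toStr (pvChild p)))
      (g := fun (d : PySem.Dict String (List String)) (q : String × String) => d.modify q.1 [] (fun l => l ++ [q.2]))).symm]
  rw [PySem.Dict.getD_foldl_modify_append]
  rw [pv_gb_getD]
  simp only [PySem.Dict.getD_empty, List.nil_append]
  rw [show (projects.map (fun p => (PySem.Int.toStr (pvKey p), PySem.Int.toStr (pvChild p))))
      = (projects.map (fun p => (pvKey p, pvChild p))).map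
          (fun q => (PySem.Int.toStr q.1, PySem.Int.toStr q.2)) from by simp]
  rw [List.filter_map]
  have hfilt : (projects.map (fun p => (pvKey p, pvChild p))).filter
      ((fun (q : String × String) => q.1 == PySem.Int.toStr j) ∘ (fun q => (PySem.Int.toStr q.1, PySem.Int.toStr q.2)))
      = (projects.map (fun p => (pvKey p, pvChild p))).filter (fun q => q.1 == j) := by
    apply List.filter_congr
    intro q _
    by_cases h : q.1 = j
    · simp [h]
    · have h2 : PySem.Int.toStr q.1 ≠ PySem.Int.toStr j := fun hh => h (pv_toStr_inj hh)
      simp [h, h2]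
  rw [hfilt, List.map_map, List.map_map]
  simp [Function.comp]

lemma pv_gb_keys (projects : List (List Int)) :
    (pvGB projects).keys = PySem.Set.ofList (projects.map pvKey) := by
  unfold pvGB
  rw [show (fun (d : PySem.Dict Int (List Int)) (p : List Int) =>
        d.modify ((PySem.List.pyGet? p 0).getD 0) [] (fun l => l ++ [(PySem.List.pyGet? p 1).getD 0]))
      = (fun d p => d.modify (pvKey p) [] (fun l => l ++ [(PySem.List.pyGet? p 1).getD 0])) from rfl]
  rw [PySem.Dict.keys_foldl_modify_key (key := pvKey) (d0 := [])
    (f := fun _ p => (fun l => l ++ [(PySem.List.pyGet? p 1).getD 0])) (d := PySem.Dict.empty)]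
  rw [show (PySem.Dict.empty : PySem.Dict Int (List Int)).keys = ([] : List Int) from rfl,
    PySem.Set.update_nil_left]

lemma pv_ga_keys (projects : List (List Int)) :
    (pvGA projects).keys = PySem.Set.ofList (projects.map (fun p => PySem.Int.toStr (pvKey p))) := by
  unfold pvGA
  rw [show (fun (d : PySem.Dict String (List String)) (p : List Int) =>
        d.modify (PySem.Int.toStr ((PySem.List.pyGet? p 0).getD 0)) []
          (fun l => l ++ [PySem.Int.toStr ((PySem.List.pyGet? p 1).getD 0)]))
      = (fun d p => d.modify (PySem.Int.toStr (pvKey p)) []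
          (fun l => l ++ [PySem.Int.toStr ((PySem.List.pyGet? p 1).getD 0)])) from rfl]
  rw [PySem.Dict.keys_foldl_modify_key (key := fun p => PySem.Int.toStr (pvKey p)) (d0 := [])
    (f := fun _ p => (fun l => l ++ [PySem.Int.toStr ((PySem.List.pyGet? p 1).getD 0)])) (d := PySem.Dict.empty)]
  rw [show (PySem.Dict.empty : PySem.Dict String (List String)).keys = ([] : List String) from rfl,
    PySem.Set.update_nil_left]

lemma pv_ga_contains (projects : List (List Int)) (j : Int) :
    (pvGA projects).contains (PySem.Int.toStr j) = (pvGB projects).contains j := by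
  rw [PySem.Dict.contains_eq_decide_mem_keys, PySem.Dict.contains_eq_decide_mem_keys,
    pv_ga_keys, pv_gb_keys]
  by_cases h : j ∈ projects.map pvKey
  · have h2 : PySem.Int.toStr j ∈ projects.map (fun p => PySem.Int.toStr (pvKey p)) := by
      obtain ⟨p, hp, he⟩ := List.mem_map.mp h
      exact List.mem_map.mpr ⟨p, hp, by rw [he]⟩
    simp [PySem.Set.mem_ofList, h, h2]
  · simp only [PySem.Set.mem_ofList]
    have h2 : PySem.Int.toStr j ∉ projects.map (fun p => PySem.Int.toStr (pvKey p)) := by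
      intro hm
      rw [show (fun p => PySem.Int.toStr (pvKey p)) = PySem.Int.toStr ∘ pvKey from rfl,
        ← List.map_map] at hm
      obtain ⟨x, hx, he⟩ := List.mem_map.mp hm
      exact h ((pv_toStr_inj he) ▸ hx)
    simp [h, h2]

def pvV (value : List Int) : PySem.Dict String Int :=
  (PySem.List.pyRange 0 (PySem.List.len value) 1).foldl
    (fun d i => d.insert (PySem.Int.toStr (i + 1)) ((PySem.List.pyGet? value i).getD 0))
    PySem.Dict.empty

lemma pv_v_items (value : List Int) :
    (pvV value).items = (PySem.List.pyRange 0 (PySem.List.len value) 1).map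
      (fun i => (PySem.Int.toStr (i + 1), (PySem.List.pyGet? value i).getD 0)) := by
  unfold pvV
  rw [PySem.Dict.items_foldl_insert_fresh (k := fun i => PySem.Int.toStr (i + 1))
    (v := fun i => (PySem.List.pyGet? value i).getD 0)]
  · rfl
  · intro a _; rfl
  · apply List.Nodup.map
    · intro a b h
      have := pv_toStr_inj h
      omega
    · exact PySem.List.nodup_pyRange_one _ _

lemma pv_v_keys_nodup (value : List Int) : (pvV value).keys.Nodup := by
  have : (pvV value).keys = (pvV value).items.map (·.1) := rfl
  rw [this, pv_v_items, List.map_map]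
  apply List.Nodup.map
  · intro a b h
    simp only [Function.comp_apply] at h
    have := pv_toStr_inj h
    omega
  · exact PySem.List.nodup_pyRange_one _ _

lemma pv_v_get (value : List Int) (j : Int) (h1 : 1 ≤ j) (h2 : j ≤ (value.length : Int)) :
    (pvV value).get? (PySem.Int.toStr j) = some ((PySem.List.pyGet? value (j - 1)).getD 0) := by
  apply PySem.Dict.get?_of_mem_items _ _ (pv_v_keys_nodup value)
  rw [pv_v_items]
  apply List.mem_map.mpr
  refine ⟨j - 1, ?_, by rw [show j - 1 + 1 = j from by omega]⟩
  rw [PySem.List.len_eq, PySem.List.mem_pyRange_one]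
  omega

lemma pv_kc (p : List Int) (h : 2 ≤ p.length) :
    pvKey p = p.getD 0 0 ∧ pvChild p = p.getD 1 0 := by
  constructor
  · unfold pvKey
    rw [PySem.List.pyGet?_zero, List.getD_eq_getElem?_getD]
  · unfold pvChild
    rw [show (1:Int) = ((1:Nat):Int) from rfl, PySem.List.pyGet?_natCast, List.getD_eq_getElem?_getD]

lemma pv_gb_mem_E (projects : List (List Int)) (hlen : ∀ p ∈ projects, 2 ≤ p.length)
    (j c : Int) (hc : c ∈ (pvGB projects).getD j []) : (j, c) ∈ pvE projects := by
  rw [pv_gb_getD] at hc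
  obtain ⟨q, hq, rfl⟩ := List.mem_map.mp hc
  have hq2 := List.mem_filter.mp hq
  obtain ⟨p, hp, rfl⟩ := List.mem_map.mp hq2.1
  have hj : pvKey p = j := by simpa using hq2.2
  obtain ⟨e0, e1⟩ := pv_kc p (hlen p hp)
  unfold pvE
  exact List.mem_map.mpr ⟨p, hp, by rw [← e0, ← e1, hj]⟩

-- ---- closure machinery ----
lemma pv_mem_stepF (E : List (Int × Int)) (S : Finset Int) (x : Int) :
    x ∈ pvStepF E S ↔ x ∈ S ∨ ∃ e ∈ E, e.1 ∈ S ∧ e.2 = x := by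
  simp [pvStepF, List.mem_filter]

lemma pv_mem_childrenF (E : List (Int × Int)) (j x : Int) :
    x ∈ pvChildrenF E j ↔ ∃ e ∈ E, e.1 = j ∧ e.2 = x := by
  simp [pvChildrenF, List.mem_filter]

lemma pv_stepF_incr (E : List (Int × Int)) (S : Finset Int) : S ⊆ pvStepF E S :=
  Finset.subset_union_left

lemma pv_stepF_mono (E : List (Int × Int)) : Monotone (pvStepF E) := by
  intro S T h x hx
  rw [pv_mem_stepF] at hx ⊢
  rcases hx with hx | ⟨e, he, h1, h2⟩
  · exact Or.inl (h hx)
  · exact Or.inr ⟨e, he, h h1, h2⟩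

lemma pv_subset_iter (E : List (Int × Int)) (n : ℕ) (A : Finset Int) :
    A ⊆ (pvStepF E)^[n] A := by
  induction n with
  | zero => simp
  | succ n ih =>
    rw [Function.iterate_succ_apply']
    exact ih.trans (pv_stepF_incr E _)

lemma pv_chain (E : List (Int × Int)) (A : Finset Int) (n : ℕ) :
    (∃ k, k < n ∧ pvStepF E ((pvStepF E)^[k] A) = (pvStepF E)^[k] A) ∨
      A.card + n ≤ ((pvStepF E)^[n] A).card := by
  induction n with
  | zero => right; simp
  | succ n ih =>
    rcases ih with ⟨k, hk, hfix⟩ | h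
    · exact Or.inl ⟨k, by omega, hfix⟩
    · by_cases he : pvStepF E ((pvStepF E)^[n] A) = (pvStepF E)^[n] A
      · exact Or.inl ⟨n, by omega, he⟩
      · right
        rw [Function.iterate_succ_apply']
        have hss : (pvStepF E)^[n] A ⊂ pvStepF E ((pvStepF E)^[n] A) :=
          (Finset.ssubset_iff_of_subset (pv_stepF_incr E _)).mpr (by
            by_contra hno
            push_neg at hno
            exact he (Finset.Subset.antisymm (fun x hx => by
              by_contra hxn
              exact absurd (hno x) (by simp [hx, hxn])) (pv_stepF_incr E _)))
        have := Finset.card_lt_card hss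
        omega

lemma pv_fix_of_card (E : List (Int × Int)) (A : Finset Int) (n : ℕ)
    (h : ((pvStepF E)^[n] A).card < A.card + n) :
    pvStepF E ((pvStepF E)^[n] A) = (pvStepF E)^[n] A := by
  rcases pv_chain E A n with ⟨k, hk, hfix⟩ | hcard
  · have hstab : ∀ m, (pvStepF E)^[k + m] A = (pvStepF E)^[k] A := by
      intro m
      induction m with
      | zero => rfl
      | succ m ih =>
        rw [show k + (m + 1) = (k + m) + 1 from by omega, Function.iterate_succ_apply', ih, hfix]
    rw [show n = k + (n - k) from by omega, hstab, hfix, ← hstab (n - k),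
      show k + (n - k) = n from by omega]
  · omega

lemma pv_reach_card (value : List Int) (projects : List (List Int))
    (hrange : ∀ j ∈ pvReach value projects, 1 ≤ j ∧ j ≤ (value.length : Int)) :
    (pvReach value projects).card ≤ value.length := by
  have hsub : pvReach value projects ⊆ Finset.Icc (1 : Int) (value.length : Int) :=
    fun j hj => Finset.mem_Icc.mpr (hrange j hj)
  have := Finset.card_le_card hsub
  rwa [Int.card_Icc, show ((value.length : Int) + 1 - 1).toNat = value.length from by omega] at this

lemma pv_reach_fix (value : List Int) (projects : List (List Int))
    (hrange : ∀ j ∈ pvReach value projects, 1 ≤ j ∧ j ≤ (value.length : Int)) :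
    pvStepF (pvE projects) (pvReach value projects) = pvReach value projects := by
  apply pv_fix_of_card
  have := pv_reach_card value projects hrange
  have h1 : ({1} : Finset Int).card = 1 := rfl
  unfold pvReach at *
  omega

def pvDesc (value : List Int) (projects : List (List Int)) (j : Int) : Finset Int :=
  (pvStepF (pvE projects))^[value.length] (pvChildrenF (pvE projects) j)

lemma pv_children_subset_step (E : List (Int × Int)) (j : Int) (S : Finset Int) (hj : j ∈ S) :
    pvChildrenF E j ⊆ pvStepF E S := by
  intro x hx
  rw [pv_mem_childrenF] at hx
  obtain ⟨e, he, h1, h2⟩ := hx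
  rw [pv_mem_stepF]
  exact Or.inr ⟨e, he, h1 ▸ hj, h2⟩

lemma pv_children_subset_reach (value : List Int) (projects : List (List Int))
    (hrange : ∀ j ∈ pvReach value projects, 1 ≤ j ∧ j ≤ (value.length : Int))
    (j : Int) (hj : j ∈ pvReach value projects) :
    pvChildrenF (pvE projects) j ⊆ pvReach value projects := by
  have := pv_children_subset_step (pvE projects) j (pvReach value projects) hj
  rwa [pv_reach_fix value projects hrange] at this

lemma pv_desc_subset_reach (value : List Int) (projects : List (List Int))
    (hrange : ∀ j ∈ pvReach value projects, 1 ≤ j ∧ j ≤ (value.length : Int))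
    (j : Int) (hj : j ∈ pvReach value projects) :
    pvDesc value projects j ⊆ pvReach value projects := by
  unfold pvDesc
  have hmono := (pv_stepF_mono (pvE projects)).iterate value.length
  have := hmono (pv_children_subset_reach value projects hrange j hj)
  rwa [Function.iterate_fixed (pv_reach_fix value projects hrange) value.length] at this

lemma pv_desc_fix (value : List Int) (projects : List (List Int))
    (hrange : ∀ j ∈ pvReach value projects, 1 ≤ j ∧ j ≤ (value.length : Int))
    (j : Int) (hj : j ∈ pvReach value projects) :
    pvStepF (pvE projects) (pvDesc value projects j) = pvDesc value projects j := by
  by_cases hc : (pvDesc value projects j).card < (pvChildrenF (pvE projects) j).card + value.length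
  · exact pv_fix_of_card _ _ _ hc
  · push_neg at hc
    have hsub := pv_desc_subset_reach value projects hrange j hj
    have hcard := pv_reach_card value projects hrange
    have heq : pvDesc value projects j = pvReach value projects :=
      Finset.eq_of_subset_of_card_le hsub (by
        have := Finset.card_le_card hsub
        omega)
    rw [heq]
    exact pv_reach_fix value projects hrange

lemma pv_rank_lt (value : List Int) (projects : List (List Int))
    (hrange : ∀ j ∈ pvReach value projects, 1 ≤ j ∧ j ≤ (value.length : Int))
    (hacyc : ∀ j ∈ pvReach value projects, j ∉ pvDesc value projects j)
    (j c : Int) (hj : j ∈ pvReach value projects) (hjc : (j, c) ∈ pvE projects) :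
    c ∈ pvReach value projects ∧ (pvDesc value projects c).card < (pvDesc value projects j).card := by
  have hchild : c ∈ pvChildrenF (pvE projects) j :=
    (pv_mem_childrenF _ _ _).mpr ⟨(j, c), hjc, rfl, rfl⟩
  have hcr : c ∈ pvReach value projects := pv_children_subset_reach value projects hrange j hj hchild
  have hcd : c ∈ pvDesc value projects j := pv_subset_iter _ _ _ hchild
  have hdd : pvDesc value projects c ⊆ pvDesc value projects j := by
    have hcc : pvChildrenF (pvE projects) c ⊆ pvDesc value projects j := by
      have := pv_children_subset_step (pvE projects) c (pvDesc value projects j) hcd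
      rwa [pv_desc_fix value projects hrange j hj] at this
    have hmono := (pv_stepF_mono (pvE projects)).iterate value.length
    have := hmono hcc
    unfold pvDesc
    rwa [Function.iterate_fixed (pv_desc_fix value projects hrange j hj) value.length] at this
  have hnc : c ∉ pvDesc value projects c := hacyc c hcr
  refine ⟨hcr, ?_⟩
  have hsub : pvDesc value projects c ⊆ (pvDesc value projects j).erase c := by
    intro x hx
    exact Finset.mem_erase.mpr ⟨fun hxe => hnc (hxe ▸ hx), hdd hx⟩
  have h1 := Finset.card_le_card hsub
  rw [Finset.card_erase_of_mem hcd] at h1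
  have h2 : 0 < (pvDesc value projects j).card := Finset.card_pos.mpr ⟨c, hcd⟩
  omega

-- ---- max versus A's if-accumulator ----
lemma pv_if_max (m x : Int) : (if m < x then x else m) = max m x := by
  rw [max_def]; split_ifs <;> omega

-- ---- A's fueled recursion is stable above the rank and reduces to an int-level step ----
lemma pv_stabA (value : List Int) (projects : List (List Int))
    (hlen : ∀ p ∈ projects, 2 ≤ p.length)
    (hrange : ∀ j ∈ pvReach value projects, 1 ≤ j ∧ j ≤ (value.length : Int))
    (hacyc : ∀ j ∈ pvReach value projects, j ∉ pvDesc value projects j) :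
    ∀ (r : ℕ) (j : Int), j ∈ pvReach value projects → (pvDesc value projects j).card = r →
      ∀ (F F' : ℕ), r < F → r < F' →
        solutionCombine (pvV value) (pvGA projects) F (PySem.Int.toStr j)
          = solutionCombine (pvV value) (pvGA projects) F' (PySem.Int.toStr j) := by
  intro r
  induction r using Nat.strong_induction_on with
  | _ r ih =>
    intro j hj hr F F' hF hF'
    match F, F', hF, hF' with
    | a + 1, b + 1, hF, hF' =>
    rw [show solutionCombine (pvV value) (pvGA projects) (a + 1) (PySem.Int.toStr j)
        = (if (pvGA projects).contains (PySem.Int.toStr j) = false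
            then ((pvV value).get? (PySem.Int.toStr j)).getD 0
            else ((pvV value).get? (PySem.Int.toStr j)).getD 0 +
              ((pvGA projects).getD (PySem.Int.toStr j) []).foldl (fun maxima s =>
                let val := solutionCombine (pvV value) (pvGA projects) a s
                if maxima < val then val else maxima) 0) from rfl]
    rw [show solutionCombine (pvV value) (pvGA projects) (b + 1) (PySem.Int.toStr j)
        = (if (pvGA projects).contains (PySem.Int.toStr j) = false
            then ((pvV value).get? (PySem.Int.toStr j)).getD 0
            else ((pvV value).get? (PySem.Int.toStr j)).getD 0 +
              ((pvGA projects).getD (PySem.Int.toStr j) []).foldl (fun maxima s =>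
                let val := solutionCombine (pvV value) (pvGA projects) b s
                if maxima < val then val else maxima) 0) from rfl]
    by_cases hcont : (pvGA projects).contains (PySem.Int.toStr j) = false
    · simp only [hcont, if_true]
    · simp only [hcont, if_false]
      rw [pv_ga_getD, List.foldl_map, List.foldl_map]
      refine congrArg (fun t => ((pvV value).get? (PySem.Int.toStr j)).getD 0 + t) ?_
      apply PySem.List.foldl_congr_mem
      intro acc c hcmem
      have hE := pv_gb_mem_E projects hlen j c hcmem
      obtain ⟨hcr, hlt⟩ := pv_rank_lt value projects hrange hacyc j c hj hE
      rw [hr] at hlt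
      rw [ih _ hlt c hcr rfl a b (by omega) (by omega)]

-- the canonical value of A at a reachable node, with one step unfolded at the int level
lemma pv_specA_eq (value : List Int) (projects : List (List Int))
    (hlen : ∀ p ∈ projects, 2 ≤ p.length)
    (hrange : ∀ j ∈ pvReach value projects, 1 ≤ j ∧ j ≤ (value.length : Int))
    (hacyc : ∀ j ∈ pvReach value projects, j ∉ pvDesc value projects j)
    (j : Int) (hj : j ∈ pvReach value projects) :
    solutionCombine (pvV value) (pvGA projects) (value.length + 1) (PySem.Int.toStr j)
      = (if (pvGB projects).contains j
          then (PySem.List.pyGet? value (j - 1)).getD 0 +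
            ((pvGB projects).getD j []).foldl (fun m c =>
              max m (solutionCombine (pvV value) (pvGA projects) (value.length + 1) (PySem.Int.toStr c))) 0
          else (PySem.List.pyGet? value (j - 1)).getD 0) := by
  obtain ⟨hj1, hj2⟩ := hrange j hj
  rw [show solutionCombine (pvV value) (pvGA projects) (value.length + 1) (PySem.Int.toStr j)
      = (if (pvGA projects).contains (PySem.Int.toStr j) = false
          then ((pvV value).get? (PySem.Int.toStr j)).getD 0
          else ((pvV value).get? (PySem.Int.toStr j)).getD 0 +
            ((pvGA projects).getD (PySem.Int.toStr j) []).foldl (fun maxima s =>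
              let val := solutionCombine (pvV value) (pvGA projects) value.length s
              if maxima < val then val else maxima) 0) from rfl]
  rw [pv_ga_contains, pv_v_get value j hj1 hj2]
  cases hc : (pvGB projects).contains j with
  | false => simp
  | true =>
    simp only [Bool.true_eq_false, if_false, if_true, Option.getD_some]
    rw [pv_ga_getD, List.foldl_map]
    refine congrArg (fun t => (PySem.List.pyGet? value (j - 1)).getD 0 + t) ?_
    apply PySem.List.foldl_congr_mem
    intro acc c hcmem
    have hE := pv_gb_mem_E projects hlen j c hcmem
    obtain ⟨hcr, hlt⟩ := pv_rank_lt value projects hrange hacyc j c hj hE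
    have hjn : (pvDesc value projects j).card ≤ value.length := by
      have := Finset.card_le_card (pv_desc_subset_reach value projects hrange j hj)
      have := pv_reach_card value projects hrange
      omega
    rw [pv_stabA value projects hlen hrange hacyc _ c hcr rfl value.length (value.length + 1)
      (by omega) (by omega), pv_if_max]

-- ---- B's memoized recursion ----
def pvGood (value : List Int) (projects : List (List Int)) (memo : PySem.Dict Int Int) : Prop :=
  ∀ k w, memo.get? k = some w →
    w = solutionCombine (pvV value) (pvGA projects) (value.length + 1) (PySem.Int.toStr k)

lemma pv_good_insert (value : List Int) (projects : List (List Int))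
    (memo : PySem.Dict Int Int) (j r : Int) (hm : pvGood value projects memo)
    (hr : r = solutionCombine (pvV value) (pvGA projects) (value.length + 1) (PySem.Int.toStr j)) :
    pvGood value projects (memo.insert j r) := by
  intro k w hk
  by_cases hkj : k = j
  · subst hkj
    rw [PySem.Dict.get?_insert_self] at hk
    cases hk
    exact hr
  · rw [PySem.Dict.get?_insert_of_ne _ _ hkj] at hk
    exact hm k w hk

lemma pv_foldB (value : List Int) (projects : List (List Int))
    (dfs : PySem.Dict Int Int → Int → (PySem.Dict Int Int × Int)) :
    ∀ (L : List Int),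
      (∀ c ∈ L, ∀ m, pvGood value projects m →
        (dfs m c).2 = solutionCombine (pvV value) (pvGA projects) (value.length + 1) (PySem.Int.toStr c)
        ∧ pvGood value projects (dfs m c).1) →
      ∀ (m : PySem.Dict Int Int) (b : Int), pvGood value projects m →
        (L.foldl (fun acc c => ((dfs acc.1 c).1, max acc.2 (dfs acc.1 c).2)) (m, b)).2
            = L.foldl (fun b c =>
                max b (solutionCombine (pvV value) (pvGA projects) (value.length + 1) (PySem.Int.toStr c))) b
          ∧ pvGood value projects
              (L.foldl (fun acc c => ((dfs acc.1 c).1, max acc.2 (dfs acc.1 c).2)) (m, b)).1 := by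
  intro L
  induction L with
  | nil => intro _ m b hm; exact ⟨rfl, hm⟩
  | cons c L ih =>
    intro h m b hm
    simp only [List.foldl_cons]
    obtain ⟨hval, hgood⟩ := h c (List.mem_cons_self ..) m hm
    rw [hval]
    exact ih (fun c' hc' => h c' (List.mem_cons_of_mem _ hc')) (dfs m c).1 _ hgood

lemma pv_mainB (value : List Int) (projects : List (List Int))
    (hlen : ∀ p ∈ projects, 2 ≤ p.length)
    (hrange : ∀ j ∈ pvReach value projects, 1 ≤ j ∧ j ≤ (value.length : Int))
    (hacyc : ∀ j ∈ pvReach value projects, j ∉ pvDesc value projects j) :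
    ∀ (r : ℕ) (j : Int), j ∈ pvReach value projects → (pvDesc value projects j).card = r →
      ∀ (F : ℕ), r < F → ∀ memo, pvGood value projects memo →
        (solutionAltDfs value (pvGB projects) F memo j).2
            = solutionCombine (pvV value) (pvGA projects) (value.length + 1) (PySem.Int.toStr j)
          ∧ pvGood value projects (solutionAltDfs value (pvGB projects) F memo j).1 := by
  intro r
  induction r using Nat.strong_induction_on with
  | _ r ih =>
    intro j hj hr F hF memo hmemo
    match F, hF with
    | a + 1, hF =>
    have hspec := pv_specA_eq value projects hlen hrange hacyc j hj
    cases hmc : memo.contains j with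
    | true =>
      obtain ⟨w, hw⟩ : ∃ w, memo.get? j = some w := by
        have hiso := PySem.Dict.contains_eq_isSome_get? (d := memo) (k := j)
        rw [hmc] at hiso
        cases hg : memo.get? j with
        | none => rw [hg] at hiso; simp at hiso
        | some w => exact ⟨w, rfl⟩
      have hstep : solutionAltDfs value (pvGB projects) (a + 1) memo j
          = (memo, (memo.get? j).getD 0) := by
        simp only [solutionAltDfs, hmc, if_pos rfl, if_true]
      rw [hstep, hw]
      exact ⟨hmemo j w hw, hmemo⟩
    | false =>
      have hfold := pv_foldB value projects (solutionAltDfs value (pvGB projects) a)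
        ((pvGB projects).getD j [])
        (by
          intro c hcmem m hmg
          have hE := pv_gb_mem_E projects hlen j c hcmem
          obtain ⟨hcr, hlt⟩ := pv_rank_lt value projects hrange hacyc j c hj hE
          rw [hr] at hlt
          exact ih _ hlt c hcr rfl a (by omega) m hmg)
        memo 0 hmemo
      cases hc : (pvGB projects).contains j with
      | true =>
        have hstep : solutionAltDfs value (pvGB projects) (a + 1) memo j
            = (((((pvGB projects).getD j []).foldl
                  (fun acc c => ((solutionAltDfs value (pvGB projects) a acc.1 c).1,
                    max acc.2 (solutionAltDfs value (pvGB projects) a acc.1 c).2)) (memo, 0)).1).insert j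
                ((PySem.List.pyGet? value (j - 1)).getD 0 +
                  (((pvGB projects).getD j []).foldl
                    (fun acc c => ((solutionAltDfs value (pvGB projects) a acc.1 c).1,
                      max acc.2 (solutionAltDfs value (pvGB projects) a acc.1 c).2)) (memo, 0)).2),
               (PySem.List.pyGet? value (j - 1)).getD 0 +
                  (((pvGB projects).getD j []).foldl
                    (fun acc c => ((solutionAltDfs value (pvGB projects) a acc.1 c).1,
                      max acc.2 (solutionAltDfs value (pvGB projects) a acc.1 c).2)) (memo, 0)).2) := by
          simp only [solutionAltDfs, hmc, hc, Bool.false_eq_true, if_false, if_true]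
        rw [hstep]
        have hval : (PySem.List.pyGet? value (j - 1)).getD 0 +
            (((pvGB projects).getD j []).foldl
              (fun acc c => ((solutionAltDfs value (pvGB projects) a acc.1 c).1,
                max acc.2 (solutionAltDfs value (pvGB projects) a acc.1 c).2)) (memo, 0)).2
            = solutionCombine (pvV value) (pvGA projects) (value.length + 1) (PySem.Int.toStr j) := by
          rw [hfold.1, hspec, hc, if_pos rfl]
        exact ⟨hval, pv_good_insert value projects _ j _ hfold.2 hval⟩
      | false =>
        have hstep : solutionAltDfs value (pvGB projects) (a + 1) memo j
            = (memo.insert j ((PySem.List.pyGet? value (j - 1)).getD 0),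
                (PySem.List.pyGet? value (j - 1)).getD 0) := by
          simp only [solutionAltDfs, hmc, hc, Bool.false_eq_true, if_false, if_true]
        rw [hstep]
        have hval : (PySem.List.pyGet? value (j - 1)).getD 0
            = solutionCombine (pvV value) (pvGA projects) (value.length + 1) (PySem.Int.toStr j) := by
          rw [hspec, hc]
          simp
        exact ⟨hval, pv_good_insert value projects memo j _ hmemo hval⟩

-- ===== VERDICT (by name: the statement is the Claim_ definition above) =====
theorem solution_spec : Claim_equal_solution := by
  intro value projects _ hpre
  obtain ⟨hlen, hrange, hacyc⟩ := hpre
  have hacyc' : ∀ j ∈ pvReach value projects, j ∉ pvDesc value projects j := hacyc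
  unfold Spec_solution
  have h1 : (1 : Int) ∈ pvReach value projects :=
    pv_subset_iter (pvE projects) value.length {1} (Finset.mem_singleton_self 1)
  have hrank : (pvDesc value projects 1).card ≤ value.length := by
    have := Finset.card_le_card (pv_desc_subset_reach value projects hrange 1 h1)
    have := pv_reach_card value projects hrange
    omega
  have hA : solution value projects
      = solutionCombine (pvV value) (pvGA projects) (value.length + 1) "1" := rfl
  have hB : solution_alt value projects
      = (solutionAltDfs value (pvGB projects) (value.length + 1) PySem.Dict.empty 1).2 := rfl
  have hmain := pv_mainB value projects hlen hrange hacyc' (pvDesc value projects 1).card 1 h1 rfl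
    (value.length + 1) (by omega) PySem.Dict.empty
    (by intro k w hk; rw [PySem.Dict.get?_empty] at hk; cases hk)
  rw [hA, hB, hmain.1]
  rfl
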